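-- pv_equiv track=rewrite | github.com/syntra-vindevoy/python-1-2024 | oefeningen/5_chars/old.py | get_2_char_combination_set
-- ===== SOURCE A (Python) =====
-- def get_2_char_combination_set(character_stringlist):
--     character_combinations = set()
--     length = len(character_stringlist)
--     for i in range(0,length):
--         char_1 = character_stringlist[i]
--         for j in range (i+1,length):
--             char_2 = character_stringlist[j]
--             character_combinations.add(''.join([char_1,char_2]))
--     return character_combinations
-- ===== SOURCE B (Python) =====
-- def get_2_char_combination_set(character_stringlist):
--     # Record the first index of each distinct element, then pair each distinct
--     # element only with the deduplicated tail after its first occurrence.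
--     first_index = {}
--     for i, ch in enumerate(character_stringlist):
--         if ch not in first_index:
--             first_index[ch] = i
--     combinations = set()
--     for ch, i in first_index.items():
--         for other in dict.fromkeys(character_stringlist[i + 1:]):
--             combinations.add(ch + other)
--     return combinations
-- ===== Notes on version B (the rewrite author's own statement) =====
-- stated objective: alternative
-- what changed: Instead of scanning all O(n^2) index pairs, B builds a first-occurrence index map once and pairs each distinct element only with the deduplicated tail after its first occurrence, skipping the duplicate pairs A re-adds; on lists with few distinct elements this does asymptotically less set work, on all-distinct lists it costs the same.
import Mathlib
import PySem

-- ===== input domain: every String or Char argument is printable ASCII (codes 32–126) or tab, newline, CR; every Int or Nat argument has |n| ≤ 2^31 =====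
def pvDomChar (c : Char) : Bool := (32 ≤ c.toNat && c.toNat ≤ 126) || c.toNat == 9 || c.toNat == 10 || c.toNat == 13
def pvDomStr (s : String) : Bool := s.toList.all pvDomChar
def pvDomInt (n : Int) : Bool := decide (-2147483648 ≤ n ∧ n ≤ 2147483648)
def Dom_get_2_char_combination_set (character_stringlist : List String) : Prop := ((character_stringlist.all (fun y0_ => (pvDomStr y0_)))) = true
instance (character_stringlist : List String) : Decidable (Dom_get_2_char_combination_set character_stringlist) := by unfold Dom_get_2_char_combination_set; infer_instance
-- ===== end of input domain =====

-- B replaces A's scan over all O(n^2) index pairs by pairing each DISTINCT element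
-- (via a first-occurrence index map) with the deduplicated tail after its first
-- occurrence — an alternative strategy that skips the redundant pairs A re-adds.

-- ===== PORT A =====
def get_2_char_combination_set (character_stringlist : List String) : List String :=
  let character_combinations : PySem.Set String := PySem.Set.empty
  let length : Int := PySem.List.len character_stringlist
  (PySem.List.pyRange 0 length 1).foldl (fun character_combinations i =>
    let char_1 := PySem.List.pyGetD character_stringlist i ""
    (PySem.List.pyRange (i + 1) length 1).foldl (fun character_combinations j =>
      let char_2 := PySem.List.pyGetD character_stringlist j ""
      PySem.Set.add character_combinations (PySem.Str.join "" [char_1, char_2]))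
      character_combinations)
    character_combinations

-- ===== PORT B =====
def get_2_char_combination_set_alt (character_stringlist : List String) : List String :=
  let first_index : PySem.Dict String Int :=
    (PySem.List.enumerate character_stringlist).foldl
      (fun d p => if d.contains p.2 then d else d.insert p.2 p.1) PySem.Dict.empty
  first_index.items.foldl (fun combinations q =>
    (PySem.List.dedup (PySem.List.slice character_stringlist (some (q.2 + 1)) none)).foldl
      (fun combinations other => PySem.Set.add combinations (q.1 ++ other)) combinations)
    PySem.Set.empty

-- ===== PRECONDITION & SPEC =====
def Spec_get_2_char_combination_set (character_stringlist : List String) (out : List String) : Prop := out = get_2_char_combination_set_alt character_stringlist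
instance (character_stringlist : List String) (out : List String) : Decidable (Spec_get_2_char_combination_set character_stringlist out) := by unfold Spec_get_2_char_combination_set; infer_instance

-- ===== CLAIM (what is proved, stated in full; the proofs are below) =====
def Claim_equal_get_2_char_combination_set : Prop := ∀ (character_stringlist : List String), Dom_get_2_char_combination_set character_stringlist → Spec_get_2_char_combination_set character_stringlist (get_2_char_combination_set character_stringlist)

-- ===== LEMMAS AND PROOFS =====

-- A's nested loop, restated structurally over the suffix of the list.
def pvAux : List String → List String → List String
  | [], acc => acc
  | a :: r, acc => pvAux r (r.foldl (fun cc c2 => PySem.Set.add cc (a ++ c2)) acc)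

-- first-occurrence (element, index) pairs, given already-seen elements
def pvFirsts : List String → Int → List String → List (String × Int)
  | [], _, _ => []
  | a :: r, i, seen =>
      if a ∈ seen then pvFirsts r (i + 1) seen
      else (a, i) :: pvFirsts r (i + 1) (a :: seen)

-- same, but carrying the tail after the first occurrence instead of its index
def pvFirstsS : List String → List String → List (String × List String)
  | [], _ => []
  | a :: r, seen =>
      if a ∈ seen then pvFirstsS r seen
      else (a, r) :: pvFirstsS r (a :: seen)

lemma pvJoin2 (a b : String) : PySem.Str.join "" [a, b] = a ++ b := by
  apply String.ext
  simp [pysem, PySem.Chars.join, List.intercalate]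

lemma pvFoldlAddNoop {α β : Type} [BEq β] [LawfulBEq β] (g : α → β) :
    ∀ (l : List α) (acc : List β), (∀ x ∈ l, g x ∈ acc) →
      l.foldl (fun c x => PySem.Set.add c (g x)) acc = acc := by
  intro l
  induction l with
  | nil => intro acc _; rfl
  | cons a r ih =>
      intro acc h
      simp only [List.foldl_cons]
      rw [PySem.Set.add_of_mem (h a (by simp))]
      exact ih acc (fun x hx => h x (by simp [hx]))

lemma pvMemFoldlAdd {α β : Type} [BEq β] [LawfulBEq β] (g : α → β)
    (l : List α) (acc : List β) (y : β) (hy : y ∈ acc) :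
    y ∈ l.foldl (fun c x => PySem.Set.add c (g x)) acc := by
  rw [← PySem.Set.update_map_eq_foldl_add]
  exact (PySem.Set.mem_update _ _ _).mpr (Or.inl hy)

lemma pvImgFoldlAdd {α β : Type} [BEq β] [LawfulBEq β] (g : α → β)
    (l : List α) (acc : List β) (x : α) (hx : x ∈ l) :
    g x ∈ l.foldl (fun c x => PySem.Set.add c (g x)) acc := by
  rw [← PySem.Set.update_map_eq_foldl_add]
  exact (PySem.Set.mem_update _ _ _).mpr (Or.inr (List.mem_map_of_mem hx))

-- folding Set.add over set(l) is the same as folding it over l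
lemma pvOfListFoldlAdd {α β : Type} [BEq α] [LawfulBEq α] [BEq β] [LawfulBEq β] (g : α → β) :
    ∀ (l : List α) (acc : List β),
      (PySem.Set.ofList l).foldl (fun c x => PySem.Set.add c (g x)) acc
        = l.foldl (fun c x => PySem.Set.add c (g x)) acc := by
  intro l
  induction l using List.reverseRecOn with
  | nil => intro acc; rfl
  | append_singleton r x ih =>
      intro acc
      rw [PySem.Set.ofList_append_singleton, List.foldl_append]
      by_cases hx : x ∈ PySem.Set.ofList r
      · rw [PySem.Set.add_of_mem hx, ih]
        simp only [List.foldl_cons, List.foldl_nil]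
        rw [PySem.Set.add_of_mem (pvImgFoldlAdd g r acc x ((PySem.Set.mem_ofList _ _).mp hx))]
      · rw [PySem.Set.add_of_not_mem hx, List.foldl_append, ih]

lemma pvFirstsCongr : ∀ (l : List String) (i : Int) (s₁ s₂ : List String),
    (∀ x, x ∈ s₁ ↔ x ∈ s₂) → pvFirsts l i s₁ = pvFirsts l i s₂ := by
  intro l
  induction l with
  | nil => intro i s₁ s₂ _; rfl
  | cons a r ih =>
      intro i s₁ s₂ h
      simp only [pvFirsts]
      by_cases ha : a ∈ s₁
      · rw [if_pos ha, if_pos ((h a).mp ha)]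
        exact ih (i + 1) s₁ s₂ h
      · rw [if_neg ha, if_neg (fun hc => ha ((h a).mpr hc))]
        refine congrArg _ (ih (i + 1) (a :: s₁) (a :: s₂) ?_)
        intro x; simp only [List.mem_cons]
        exact or_congr Iff.rfl (h x)

lemma pvDictItems : ∀ (l : List String) (s : Int) (d : PySem.Dict String Int),
    ((PySem.List.enumerate l s).foldl
        (fun d p => if d.contains p.2 then d else d.insert p.2 p.1) d).items
      = d.items ++ pvFirsts l s d.keys := by
  intro l
  induction l with
  | nil => intro s d; simp [PySem.List.enumerate_nil, pvFirsts]
  | cons a r ih =>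
      intro s d
      rw [PySem.List.enumerate_cons]
      simp only [List.foldl_cons, pvFirsts]
      by_cases hc : d.contains a = true
      · rw [if_pos hc, if_pos ((PySem.Dict.contains_iff_mem_keys _ _).mp hc), ih]
      · have hm : a ∉ d.keys := fun hk => hc ((PySem.Dict.contains_iff_mem_keys _ _).mpr hk)
        rw [if_neg hc, if_neg hm, ih]
        rw [PySem.Dict.items_insert_of_not_contains _ _ (by simpa using hc)]
        rw [PySem.Dict.keys_insert_of_not_contains _ _ (by simpa using hc)]
        rw [pvFirstsCongr r (s + 1) (d.keys ++ [a]) (a :: d.keys) (by intro x; simp; tauto)]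
        simp

lemma pvBridge (X : List String) : ∀ (ds : List String) (i : Int) (k : Nat) (seen : List String),
    i = (k : Int) → X.drop k = ds →
    (pvFirsts ds i seen).map
        (fun q => (q.1, PySem.List.slice X (some (q.2 + 1)) none))
      = pvFirstsS ds seen := by
  intro ds
  induction ds with
  | nil => intro i k seen _ _; rfl
  | cons a r ih =>
      intro i k seen hik hd
      have hdr : X.drop (k + 1) = r := by
        rw [← List.tail_drop, hd]
        rfl
      have hik' : i + 1 = ((k + 1 : Nat) : Int) := by omega
      simp only [pvFirsts, pvFirstsS]
      by_cases ha : a ∈ seen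
      · rw [if_pos ha, if_pos ha]
        exact ih (i + 1) (k + 1) seen hik' hdr
      · rw [if_neg ha, if_neg ha]
        simp only [List.map_cons]
        rw [show PySem.List.slice X (some (i + 1)) none = r by
              rw [hik', PySem.List.slice_from_natCast, hdr],
            ih (i + 1) (k + 1) (a :: seen) hik' hdr]

lemma pvMain : ∀ (xs acc seen : List String),
    (∀ a ∈ seen, ∀ c ∈ xs, (a ++ c) ∈ acc) →
    pvAux xs acc
      = (pvFirstsS xs seen).foldl
          (fun cc q => (PySem.List.dedup q.2).foldl
            (fun c o => PySem.Set.add c (q.1 ++ o)) cc) acc := by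
  intro xs
  induction xs with
  | nil => intro acc seen _; rfl
  | cons a r ih =>
      intro acc seen h
      simp only [pvAux, pvFirstsS]
      by_cases ha : a ∈ seen
      · rw [if_pos ha]
        rw [pvFoldlAddNoop (fun c2 => a ++ c2) r acc
              (fun x hx => h a ha x (by simp [hx]))]
        exact ih acc seen (fun b hb c hc => h b hb c (by simp [hc]))
      · rw [if_neg ha]
        simp only [List.foldl_cons, PySem.List.dedup_eq_ofList,
          pvOfListFoldlAdd (fun o => a ++ o) r acc]
        refine ih _ (a :: seen) ?_
        intro b hb c hc
        rcases List.mem_cons.mp hb with hb | hb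
        · subst hb
          exact pvImgFoldlAdd (fun c2 => b ++ c2) r acc c hc
        · exact pvMemFoldlAdd _ r acc _ (h b hb c (by simp [hc]))

lemma pvLemA (X : List String) : ∀ (ds : List String) (i : Int) (k : Nat) (acc : List String),
    i = (k : Int) → X.drop k = ds →
    (PySem.List.pyRange i (PySem.List.len X) 1).foldl
      (fun cc i => (PySem.List.pyRange (i + 1) (PySem.List.len X) 1).foldl
        (fun cc2 j =>
          PySem.Set.add cc2 (PySem.List.pyGetD X i "" ++ PySem.List.pyGetD X j "")) cc) acc
      = pvAux ds acc := by
  intro ds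
  induction ds with
  | nil =>
      intro i k acc hik hd
      have hk : X.length ≤ k := List.drop_eq_nil_iff.mp hd
      rw [PySem.List.len_eq, PySem.List.pyRange_one_eq_nil (by omega)]
      rfl
  | cons a r ih =>
      intro i k acc hik hd
      have hk : k < X.length := by
        by_contra hk
        rw [List.drop_eq_nil_iff.mpr (by omega)] at hd
        exact List.cons_ne_nil a r hd.symm
      have hdr : X.drop (k + 1) = r := by
        rw [← List.tail_drop, hd]
        rfl
      have hXk : PySem.List.pyGetD X i "" = a := by
        have h0 : X[k]? = some a := by
          have h1 : (X.drop k)[0]? = some a := by rw [hd]; rfl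
          simpa using h1
        rw [hik]
        simp [PySem.List.pyGetD_natCast, List.getD_eq_getElem?_getD, h0]
      have hik' : i + 1 = ((k + 1 : Nat) : Int) := by omega
      have hlen : i < PySem.List.len X := by rw [PySem.List.len_eq]; omega
      rw [PySem.List.pyRange_one_cons hlen]
      simp only [List.foldl_cons, hXk]
      rw [PySem.List.foldl_pyRange_pyGetD X ""
            (fun cc2 c2 => PySem.Set.add cc2 (a ++ c2)) acc
            (show (0 : Int) ≤ i + 1 by omega)]
      rw [show (i + 1).toNat = k + 1 from by omega, hdr]
      rw [ih (i + 1) (k + 1) _ hik' hdr]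
      rfl

-- ===== VERDICT (by name: the statement is the Claim_ definition above) =====
theorem get_2_char_combination_set_spec : Claim_equal_get_2_char_combination_set := by
  intro xs _
  show get_2_char_combination_set xs = get_2_char_combination_set_alt xs
  have hA : get_2_char_combination_set xs = pvAux xs [] := by
    unfold get_2_char_combination_set
    simp only [pvJoin2]
    exact pvLemA xs xs 0 0 [] rfl rfl
  have hitems :
      ((PySem.List.enumerate xs 0).foldl
          (fun d p => if d.contains p.2 then d else d.insert p.2 p.1)
          PySem.Dict.empty).items = pvFirsts xs 0 [] := by
    have h := pvDictItems xs 0 PySem.Dict.empty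
    rw [h]
    rfl
  have h1 : get_2_char_combination_set_alt xs
      = (pvFirsts xs 0 []).foldl
          (fun combinations q =>
            (PySem.List.dedup (PySem.List.slice xs (some (q.2 + 1)) none)).foldl
              (fun combinations other => PySem.Set.add combinations (q.1 ++ other)) combinations)
          [] := by
    show List.foldl
        (fun combinations q =>
          List.foldl (fun combinations other => PySem.Set.add combinations (q.1 ++ other))
            combinations
            (PySem.List.dedup (PySem.List.slice xs (some (q.2 + 1)) none)))
        PySem.Set.empty
        ((PySem.List.enumerate xs 0).foldl
          (fun d p => if d.contains p.2 then d else d.insert p.2 p.1) PySem.Dict.empty).items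
      = _
    rw [hitems]
    rfl
  have h2 : (pvFirsts xs 0 []).map
        (fun q => (q.1, PySem.List.slice xs (some (q.2 + 1)) none))
      = pvFirstsS xs [] := pvBridge xs xs 0 0 [] rfl rfl
  have hB : get_2_char_combination_set_alt xs
      = (pvFirstsS xs []).foldl
          (fun cc q => (PySem.List.dedup q.2).foldl
            (fun c o => PySem.Set.add c (q.1 ++ o)) cc) [] := by
    rw [h1, ← h2, List.foldl_map]
  rw [hA, hB]
  exact pvMain xs [] [] (by simp)
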